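-- pv_equiv track=rewrite | github.com/aliyun/aliyun-log-python-sdk | aliyun/log/auth.py | _v4_uri_encode
-- ===== SOURCE A (Python) =====
-- def _v4_uri_encode(raw_text):
--     raw_text = str(raw_text)
--
--     res = ''
--     for b in raw_text:
--         if isinstance(b, int):
--             c = chr(b)
--         else:
--             c = b
--         if ('A' <= c <= 'Z') or ('a' <= c <= 'z') \
--                 or ('0' <= c <= '9') or c in ['_', '-', '~', '.']:
--             res += c
--         else:
--             res += "%{0:02X}".format(ord(c))
--     return res
-- ===== SOURCE B (Python) =====
-- import re
--
-- def _v4_uri_encode(raw_text):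
--     return re.sub(r'[^A-Za-z0-9_\-~.]',
--                   lambda m: "%{0:02X}".format(ord(m.group())),
--                   str(raw_text))
-- ===== Notes on version B (the rewrite author's own statement) =====
-- stated objective: idiomatic
-- what changed: Replaces the explicit per-character accumulation loop with a single re.sub over the non-unreserved character class, with a callback that percent-encodes only matched characters.
import Mathlib
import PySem

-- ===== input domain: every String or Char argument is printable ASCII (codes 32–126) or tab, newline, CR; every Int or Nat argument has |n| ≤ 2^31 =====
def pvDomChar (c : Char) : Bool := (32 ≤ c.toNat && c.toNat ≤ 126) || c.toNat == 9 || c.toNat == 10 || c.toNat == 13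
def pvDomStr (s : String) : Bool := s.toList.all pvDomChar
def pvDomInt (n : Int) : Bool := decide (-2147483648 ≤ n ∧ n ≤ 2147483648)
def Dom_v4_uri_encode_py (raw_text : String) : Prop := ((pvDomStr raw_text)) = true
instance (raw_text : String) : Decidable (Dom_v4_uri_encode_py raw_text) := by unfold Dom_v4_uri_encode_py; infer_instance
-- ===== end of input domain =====

-- B replaces A's explicit per-character accumulation loop with a single regex
-- substitution over the non-unreserved character class (idiomatic; same result).


-- ===== PORT A =====
-- hex digit of n < 16, uppercase — exact for "%{0:02X}".format(ord c) with ord c < 256 (all of Dom)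
def pvHexDigit (n : Nat) : Char := if n < 10 then Char.ofNat (48 + n) else Char.ofNat (55 + n)

-- "%{0:02X}".format(ord c) (used by both Pythons) as a List Char (ord c < 256 on Dom, so exactly two hex digits)
def pvPctA (c : Char) : List Char := ['%', pvHexDigit (c.toNat / 16), pvHexDigit (c.toNat % 16)]

-- A: res = ''; for b in raw_text: (isinstance(b,int) is always False for a str, so c = b);
--    append c if unreserved else the percent-encoding.  String built on the List Char side.
def v4_uri_encode_py (raw_text : String) : String :=
  String.mk <|
    raw_text.toList.foldl
      (fun res c =>
        if ('A' ≤ c ∧ c ≤ 'Z') ∨ ('a' ≤ c ∧ c ≤ 'z') ∨ ('0' ≤ c ∧ c ≤ '9')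
            ∨ c ∈ ['_', '-', '~', '.'] then
          res ++ [c]
        else
          res ++ pvPctA c)
      []

-- ===== PORT B =====
-- the regex character class [^A-Za-z0-9_\-~.]: true iff c is matched (must be encoded)
def pvMatches (c : Char) : Bool :=
  !(('A' ≤ c && c ≤ 'Z') || ('a' ≤ c && c ≤ 'z') || ('0' ≤ c && c ≤ '9')
    || c == '_' || c == '-' || c == '~' || c == '.')

-- B: re.sub replaces each matched character by the callback's value and keeps the rest
def v4_uri_encode_py_alt (raw_text : String) : String :=
  String.mk (raw_text.toList.flatMap (fun c => if pvMatches c then pvPctA c else [c]))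

-- ===== PRECONDITION & SPEC =====
def Spec_v4_uri_encode_py (raw_text : String) (out : String) : Prop := out = v4_uri_encode_py_alt raw_text
instance (raw_text : String) (out : String) : Decidable (Spec_v4_uri_encode_py raw_text out) := by unfold Spec_v4_uri_encode_py; infer_instance

-- ===== CLAIM (what is proved, stated in full; the proofs are below) =====
def Claim_equal_v4_uri_encode_py : Prop := ∀ (raw_text : String), Dom_v4_uri_encode_py raw_text → Spec_v4_uri_encode_py raw_text (v4_uri_encode_py raw_text)

-- ===== LEMMAS AND PROOFS =====

-- the regex class is the complement of A's unreserved-character test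
theorem pvMatches_eq (c : Char) :
    pvMatches c = !decide (('A' ≤ c ∧ c ≤ 'Z') ∨ ('a' ≤ c ∧ c ≤ 'z')
      ∨ ('0' ≤ c ∧ c ≤ '9') ∨ c ∈ ['_', '-', '~', '.']) := by
  simp only [pvMatches, List.mem_cons, List.not_mem_nil, or_false,
    Bool.decide_or, Bool.decide_and]
  simp [Bool.or_assoc, beq_eq_decide]

-- per-character agreement: A's branch produces exactly B's substitution for that character
theorem pv_step_eq (c : Char) :
    (if ('A' ≤ c ∧ c ≤ 'Z') ∨ ('a' ≤ c ∧ c ≤ 'z') ∨ ('0' ≤ c ∧ c ≤ '9')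
        ∨ c ∈ ['_', '-', '~', '.'] then [c] else pvPctA c)
      = (if pvMatches c then pvPctA c else [c]) := by
  rw [pvMatches_eq]
  by_cases h : ('A' ≤ c ∧ c ≤ 'Z') ∨ ('a' ≤ c ∧ c ≤ 'z') ∨ ('0' ≤ c ∧ c ≤ '9')
      ∨ c ∈ ['_', '-', '~', '.']
  · rw [if_pos h, decide_eq_true h]; rfl
  · rw [if_neg h, decide_eq_false h]; rfl

-- A's accumulating fold equals the flatMap of its per-character step
theorem pv_fold_eq (l : List Char) (acc : List Char) :
    l.foldl
      (fun res c =>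
        if ('A' ≤ c ∧ c ≤ 'Z') ∨ ('a' ≤ c ∧ c ≤ 'z') ∨ ('0' ≤ c ∧ c ≤ '9')
            ∨ c ∈ ['_', '-', '~', '.'] then res ++ [c] else res ++ pvPctA c)
      acc
    = acc ++ l.flatMap (fun c => if pvMatches c then pvPctA c else [c]) := by
  induction l generalizing acc with
  | nil => simp
  | cons c t ih =>
    simp only [List.foldl_cons, List.flatMap_cons]
    rw [ih]
    rw [← pv_step_eq c]
    split_ifs <;> simp

-- ===== VERDICT (by name: the statement is the Claim_ definition above) =====
theorem v4_uri_encode_py_spec : Claim_equal_v4_uri_encode_py := by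
  intro raw_text _
  unfold Spec_v4_uri_encode_py v4_uri_encode_py v4_uri_encode_py_alt
  rw [pv_fold_eq]
  simp
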